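-- pv_equiv track=rewrite | github.com/abh33/eYRC_Berryminator_Theme | Tasks/Task_6_plagiarism_check/Task_6_all_files/bonus/bonus_BM_1115_theme_implementation_primary.py | updation_room_entry
-- ===== SOURCE A (Python) =====
-- def updation_room_entry(rooms_entry):
--
-- 	"""
-- 	Purpose:
-- 	---
-- 	This function takes the rooms_entry list of tuples and arranges it in order wise.
-- 	Room 1  :- top left
-- 	Room 2  :- top right
-- 	Room 3  :- bottom right
-- 	Room 4  :- bottom left
--
-- 	arranges as per the rulebook
--
-- 	Input Arguments:
-- 	---
-- 	`rooms_entry`    :   [ list of tuples ]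
-- 		entry coordinates of all 4 rooms
--
--
-- 	Returns:
-- 	---
-- 	`new_rooms_entry` 	:  [ list of tuples ]
-- 		updated rooms_entry order wise
--
--
-- 	Example call:
-- 	---
-- 	new_rooms_entry=updation_room_entry(rooms_entry)
-- 	"""
-- 	################################################################################
-- 	### UPDTATION OF ROOM Entry COORDINATES to shifted Origin ###
--
-- 	new_rooms_entry=[(0,0),(0,0),(0,0),(0,0)]
-- 	for i in range (0,4):
-- 		a=rooms_entry[i][0]
-- 		b=rooms_entry[i][1]
-- 		rooms_entry[i]=(a-4,b-4)
--
--
-- 	for i in range (0,4):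
-- 		a=rooms_entry[i]
-- 		if(a[0]<0 and a[1]>0):
-- 			new_rooms_entry[0]=a
-- 		elif(a[0]>0 and a[1]>0):
-- 			new_rooms_entry[1]=a
-- 		elif(a[0]>0 and a[1]<0):
-- 			new_rooms_entry[2]=a
-- 		elif(a[0]<0 and a[1]<0):
-- 			new_rooms_entry[3]=a
--
--
--
-- 	for i in range (0,4):
-- 		for j in range (0,i):
-- 			a=new_rooms_entry[i][0]
-- 			b=new_rooms_entry[i][1]
-- 			new_rooms_entry[i]=(-b,a)
--
-- 	return new_rooms_entry
-- ===== SOURCE B (Python) =====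
-- def updation_room_entry(rooms_entry):
--     new_rooms_entry = [(0, 0), (0, 0), (0, 0), (0, 0)]
--     for i in range(4):
--         a, b = rooms_entry[i]
--         a -= 4
--         b -= 4
--         rooms_entry[i] = (a, b)
--         if a == 0 or b == 0:
--             continue
--         slot = (0 if b > 0 else 3) if a < 0 else (1 if b > 0 else 2)
--         # rotate (a, b) by 90 degrees `slot` times, closed form
--         new_rooms_entry[slot] = [(a, b), (-b, a), (-a, -b), (b, -a)][slot]
--     return new_rooms_entry
-- ===== Notes on version B (the rewrite author's own statement) =====
-- stated objective: simpler
-- what changed: A's three separate passes (shift all four points, classify each into a quadrant slot, then rotate slot i by 90 degrees i times with a nested loop) are fused into one single loop that shifts each point, picks its slot from the sign tests, and writes the slot-rotated point directly via a closed-form rotation table, eliminating the second and third passes entirely.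
import Mathlib
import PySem

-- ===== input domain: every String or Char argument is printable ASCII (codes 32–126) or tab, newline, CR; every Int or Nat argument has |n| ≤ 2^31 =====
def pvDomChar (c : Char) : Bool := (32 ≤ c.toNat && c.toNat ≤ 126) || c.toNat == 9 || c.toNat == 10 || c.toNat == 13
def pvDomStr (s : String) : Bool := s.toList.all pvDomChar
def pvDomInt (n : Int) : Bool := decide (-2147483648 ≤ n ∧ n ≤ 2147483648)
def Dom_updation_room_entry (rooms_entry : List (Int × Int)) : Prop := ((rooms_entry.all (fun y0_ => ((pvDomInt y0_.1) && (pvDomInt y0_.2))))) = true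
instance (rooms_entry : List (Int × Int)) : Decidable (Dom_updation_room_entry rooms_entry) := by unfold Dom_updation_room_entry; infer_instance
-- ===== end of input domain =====

-- B fuses A's three passes (shift all, classify all, rotate each slot) into one loop that
-- shifts, classifies and rotates each point directly into its slot (objective: simpler).
-- In Python both A and B mutate the first four entries of rooms_entry in place the same
-- way; the equivalence proved here is about the RETURN value (the ports are pure).

-- ===== PORT A =====
-- first loop of A: rooms_entry[i] = (a-4, b-4) for i in range(0,4)
def pvALoop1 (rooms_entry : List (Int × Int)) : List (Int × Int) :=
  (PySem.List.pyRange 0 4 1).foldl (fun l i =>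
    let a := (PySem.List.pyGetD l i ((0:Int),(0:Int))).1
    let b := (PySem.List.pyGetD l i ((0:Int),(0:Int))).2
    PySem.List.pySetD l i (a-4, b-4)) rooms_entry

-- second loop of A: classify each shifted point into a quadrant slot
def pvALoop2 (rooms1 : List (Int × Int)) (new_rooms_entry : List (Int × Int)) : List (Int × Int) :=
  (PySem.List.pyRange 0 4 1).foldl (fun nl i =>
    let a := PySem.List.pyGetD rooms1 i ((0:Int),(0:Int))
    if a.1 < 0 ∧ 0 < a.2 then PySem.List.pySetD nl 0 a
    else if 0 < a.1 ∧ 0 < a.2 then PySem.List.pySetD nl 1 a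
    else if 0 < a.1 ∧ a.2 < 0 then PySem.List.pySetD nl 2 a
    else if a.1 < 0 ∧ a.2 < 0 then PySem.List.pySetD nl 3 a
    else nl) new_rooms_entry

-- third loop of A: rotate slot i by 90° i times
def pvALoop3 (new_rooms_entry : List (Int × Int)) : List (Int × Int) :=
  (PySem.List.pyRange 0 4 1).foldl (fun nl i =>
    (PySem.List.pyRange 0 i 1).foldl (fun nl' _j =>
      let a := (PySem.List.pyGetD nl' i ((0:Int),(0:Int))).1
      let b := (PySem.List.pyGetD nl' i ((0:Int),(0:Int))).2
      PySem.List.pySetD nl' i (-b, a)) nl) new_rooms_entry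

def updation_room_entry (rooms_entry : List (Int × Int)) : List (Int × Int) :=
  pvALoop3 (pvALoop2 (pvALoop1 rooms_entry) [(0,0),(0,0),(0,0),(0,0)])

-- ===== PORT B =====
-- one iteration of B's single fused loop; state = (rooms_entry, new_rooms_entry)
def pvBStep (st : List (Int × Int) × List (Int × Int)) (i : Int) : List (Int × Int) × List (Int × Int) :=
  let p := PySem.List.pyGetD st.1 i ((0:Int),(0:Int))
  let a := p.1 - 4
  let b := p.2 - 4
  let rooms' := PySem.List.pySetD st.1 i (a, b)
  let new' :=
    if a = 0 ∨ b = 0 then st.2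
    else
      let slot : Int := if a < 0 then (if 0 < b then 0 else 3) else (if 0 < b then 1 else 2)
      PySem.List.pySetD st.2 slot
        (PySem.List.pyGetD [(a,b), (-b,a), (-a,-b), (b,-a)] slot ((0:Int),(0:Int)))
  (rooms', new')

def updation_room_entry_alt (rooms_entry : List (Int × Int)) : List (Int × Int) :=
  ((PySem.List.pyRange 0 4 1).foldl pvBStep (rooms_entry, [(0,0),(0,0),(0,0),(0,0)])).2

-- ===== PRECONDITION & SPEC =====
-- Pre_: A indexes rooms_entry[0..3], raising IndexError on shorter lists.
def Pre_updation_room_entry (rooms_entry : List (Int × Int)) : Prop := 4 ≤ rooms_entry.length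
instance (rooms_entry : List (Int × Int)) : Decidable (Pre_updation_room_entry rooms_entry) := by unfold Pre_updation_room_entry; infer_instance
def pvWitness_updation_room_entry : (List (Int × Int)) := [(1,6),(6,7),(7,2),(2,1)]

def Spec_updation_room_entry (rooms_entry : List (Int × Int)) (out : List (Int × Int)) : Prop := out = updation_room_entry_alt rooms_entry
instance (rooms_entry : List (Int × Int)) (out : List (Int × Int)) : Decidable (Spec_updation_room_entry rooms_entry out) := by unfold Spec_updation_room_entry; infer_instance

-- ===== CLAIM (what is proved, stated in full; the proofs are below) =====
def Claim_equal_updation_room_entry : Prop := ∀ (rooms_entry : List (Int × Int)), Dom_updation_room_entry rooms_entry → Pre_updation_room_entry rooms_entry → Spec_updation_room_entry rooms_entry (updation_room_entry rooms_entry)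

-- ===== LEMMAS AND PROOFS =====

-- the shift of pass 1 / of B's step (a-4, b-4)
def pvShift (p : Int × Int) : Int × Int := (p.1 - 4, p.2 - 4)

-- one classification step of A's second loop
def pvCStep (r : Int × Int) (nl : List (Int × Int)) : List (Int × Int) :=
  if r.1 < 0 ∧ 0 < r.2 then PySem.List.pySetD nl 0 r
  else if 0 < r.1 ∧ 0 < r.2 then PySem.List.pySetD nl 1 r
  else if 0 < r.1 ∧ r.2 < 0 then PySem.List.pySetD nl 2 r
  else if r.1 < 0 ∧ r.2 < 0 then PySem.List.pySetD nl 3 r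
  else nl

-- the new_rooms_entry update of one iteration of B's loop
def pvNStep (r : Int × Int) (nl : List (Int × Int)) : List (Int × Int) :=
  if r.1 = 0 ∨ r.2 = 0 then nl
  else
    let slot : Int := if r.1 < 0 then (if 0 < r.2 then 0 else 3) else (if 0 < r.2 then 1 else 2)
    PySem.List.pySetD nl slot
      (PySem.List.pyGetD [(r.1,r.2), (-r.2,r.1), (-r.1,-r.2), (r.2,-r.1)] slot ((0:Int),(0:Int)))

theorem pvh4 : PySem.List.pyRange 0 4 1 = [0,1,2,3] := by decide

theorem pvL1 (q0 q1 q2 q3 : Int × Int) (rest : List (Int × Int)) :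
    pvALoop1 (q0::q1::q2::q3::rest) = pvShift q0::pvShift q1::pvShift q2::pvShift q3::rest := by
  simp [pvALoop1, pvh4, pvShift, pysem]

theorem pvL2 (r0 r1 r2 r3 : Int × Int) (rest : List (Int × Int)) (nl : List (Int × Int)) :
    pvALoop2 (r0::r1::r2::r3::rest) nl = pvCStep r3 (pvCStep r2 (pvCStep r1 (pvCStep r0 nl))) := by
  simp only [pvALoop2, pvCStep, pvh4, List.foldl_cons, List.foldl_nil]
  simp [pysem]

set_option maxHeartbeats 2000000 in
theorem pvL3' (a1 b1 a2 b2 a3 b3 : Int) (x0 : Int × Int) :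
    pvALoop3 [x0, (a1,b1), (a2,b2), (a3,b3)] = [x0, (-b1, a1), (-a2, -b2), (b3, -a3)] := by
  have h1 : PySem.List.pyRange 0 1 1 = [0] := by decide
  have h2 : PySem.List.pyRange 0 2 1 = [0,1] := by decide
  have h3 : PySem.List.pyRange 0 3 1 = [0,1,2] := by decide
  have h0 : PySem.List.pyRange 0 0 1 = [] := by decide
  simp only [pvALoop3, pvh4, h0, h1, h2, h3, List.foldl_cons, List.foldl_nil]
  simp [pysem]

theorem pvL3 (x0 x1 x2 x3 : Int × Int) :
    pvALoop3 [x0, x1, x2, x3] = [x0, (-x1.2, x1.1), (-x2.1, -x2.2), (x3.2, -x3.1)] := by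
  obtain ⟨a1,b1⟩ := x1; obtain ⟨a2,b2⟩ := x2; obtain ⟨a3,b3⟩ := x3
  exact pvL3' a1 b1 a2 b2 a3 b3 x0

set_option maxHeartbeats 1000000 in
theorem pvAltEq (q0 q1 q2 q3 : Int × Int) (rest : List (Int × Int)) :
    updation_room_entry_alt (q0::q1::q2::q3::rest)
      = pvNStep (pvShift q3) (pvNStep (pvShift q2) (pvNStep (pvShift q1) (pvNStep (pvShift q0) [(0,0),(0,0),(0,0),(0,0)]))) := by
  simp only [updation_room_entry_alt, pvBStep, pvNStep, pvShift, pvh4, List.foldl_cons, List.foldl_nil]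
  simp [pysem]

theorem pvCStep_length (r : Int × Int) (nl : List (Int × Int)) :
    (pvCStep r nl).length = nl.length := by
  unfold pvCStep; split_ifs <;> simp [pysem]

-- key commutation: rotating after classifying one point = classifying the rotated point
set_option maxHeartbeats 2000000 in
theorem pvStepComm' (a b : Int) (x0 x1 x2 x3 : Int × Int) :
    pvALoop3 (pvCStep (a,b) [x0,x1,x2,x3]) = pvNStep (a,b) (pvALoop3 [x0,x1,x2,x3]) := by
  rcases lt_trichotomy a 0 with ha|ha|ha <;> rcases lt_trichotomy b 0 with hb|hb|hb
  · have h1 : ¬(0 < a) := by omega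
    have h2 : ¬(0 < b) := by omega
    have h3 : ¬(a = 0) := by omega
    have h4 : ¬(b = 0) := by omega
    simp [pvCStep, pvNStep, ha, hb, h1, h2, h3, h4, pvL3, pysem]
  · subst hb
    simp [pvCStep, pvNStep, ha, pvL3, pysem]
  · have h3 : ¬(a = 0) := by omega
    have h4 : ¬(b = 0) := by omega
    simp [pvCStep, pvNStep, ha, hb, h3, h4, pvL3, pysem]
  · subst ha
    simp [pvCStep, pvNStep, hb, pvL3, pysem]
  · subst ha; subst hb
    simp [pvCStep, pvNStep, pvL3, pysem]
  · subst ha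
    simp [pvCStep, pvNStep, hb, pvL3, pysem]
  · have h1 : ¬(a < 0) := by omega
    have h2 : ¬(0 < b) := by omega
    have h3 : ¬(a = 0) := by omega
    have h4 : ¬(b = 0) := by omega
    simp [pvCStep, pvNStep, ha, hb, h1, h2, h3, h4, pvL3, pysem]
  · subst hb
    simp [pvCStep, pvNStep, ha, pvL3, pysem]
  · have h1 : ¬(a < 0) := by omega
    have h3 : ¬(a = 0) := by omega
    have h4 : ¬(b = 0) := by omega
    simp [pvCStep, pvNStep, ha, hb, h1, h3, h4, pvL3, pysem]

theorem pvStepComm (r : Int × Int) (nl : List (Int × Int)) (h : nl.length = 4) :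
    pvALoop3 (pvCStep r nl) = pvNStep r (pvALoop3 nl) := by
  obtain ⟨a,b⟩ := r
  match nl, h with
  | [x0,x1,x2,x3], _ => exact pvStepComm' a b x0 x1 x2 x3

theorem pvAEq (q0 q1 q2 q3 : Int × Int) (rest : List (Int × Int)) :
    updation_room_entry (q0::q1::q2::q3::rest)
      = pvNStep (pvShift q3) (pvNStep (pvShift q2) (pvNStep (pvShift q1) (pvNStep (pvShift q0) [(0,0),(0,0),(0,0),(0,0)]))) := by
  have hN0 : pvALoop3 [(0,0),(0,0),(0,0),(0,0)] = [(0,0),(0,0),(0,0),(0,0)] := by decide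
  have l0 : (pvCStep (pvShift q0) [((0:Int),(0:Int)),(0,0),(0,0),(0,0)]).length = 4 := by
    rw [pvCStep_length]; rfl
  have l1 : (pvCStep (pvShift q1) (pvCStep (pvShift q0) [((0:Int),(0:Int)),(0,0),(0,0),(0,0)])).length = 4 := by
    rw [pvCStep_length]; exact l0
  have l2 : (pvCStep (pvShift q2) (pvCStep (pvShift q1) (pvCStep (pvShift q0) [((0:Int),(0:Int)),(0,0),(0,0),(0,0)]))).length = 4 := by
    rw [pvCStep_length]; exact l1
  unfold updation_room_entry
  rw [pvL1, pvL2, pvStepComm _ _ l2, pvStepComm _ _ l1, pvStepComm _ _ l0,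
      pvStepComm _ _ (by rfl), hN0]

-- ===== VERDICT (by name: the statement is the Claim_ definition above) =====
theorem updation_room_entry_spec : Claim_equal_updation_room_entry := by
  intro rooms_entry _hdom hpre
  unfold Spec_updation_room_entry
  match rooms_entry, hpre with
  | q0::q1::q2::q3::rest, _ => rw [pvAEq, pvAltEq]
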